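-- pv_equiv track=rewrite | github.com/st34-satoshi/Introduction-to-Algorithms | 5-probailistic/hiring.py | hire_assistant
-- ===== SOURCE A (Python) =====
-- def hire_assistant(n):
--     best = 0
--     hire = None
--     cnt = 0
--     for i in range(len(n)):
--         if n[i] > best:
--             best = n[i]
--             cnt += 1
--             hire = i
--     return cnt, hire
-- ===== SOURCE B (Python) =====
-- def hire_assistant(n):
--     # count "records": elements > 0 that beat every earlier element
--     cnt = 0
--     for i, v in enumerate(n):
--         if v > 0 and all(w < v for w in n[:i]):
--             cnt += 1
--     m = max(n, default=0)
--     hire = n.index(m) if m > 0 else None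
--     return cnt, hire
-- ===== Notes on version B (the rewrite author's own statement) =====
-- stated objective: alternative
-- what changed: Replaces A's single running-max state machine by a direct characterisation: the count is the number of positive left-to-right records (checked against the whole prefix), and the last hire is the first index of the global maximum (max with default, list.index), no running best/hire/cnt state.
import Mathlib
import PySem

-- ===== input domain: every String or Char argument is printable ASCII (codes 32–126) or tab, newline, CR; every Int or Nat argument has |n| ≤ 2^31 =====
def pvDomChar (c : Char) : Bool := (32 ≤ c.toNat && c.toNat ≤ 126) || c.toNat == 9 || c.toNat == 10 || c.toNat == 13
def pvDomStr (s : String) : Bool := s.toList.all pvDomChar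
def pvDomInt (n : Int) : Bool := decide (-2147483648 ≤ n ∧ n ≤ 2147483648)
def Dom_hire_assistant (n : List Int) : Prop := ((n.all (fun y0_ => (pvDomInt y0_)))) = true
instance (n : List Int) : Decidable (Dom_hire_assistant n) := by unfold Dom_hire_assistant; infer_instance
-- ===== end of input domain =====

-- B re-derives the result directly (count of positive left-to-right records via a per-element prefix check; last hire = first index of the global max) instead of A's running best/hire/cnt state machine; objective: alternative decomposition, not faster.
-- ===== PORT A =====
-- state (best, hire, cnt); for i in range(len(n)): if n[i] > best: best, cnt, hire updated
def hire_assistant (n : List Int) : Int × Option Int :=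
  let s := (PySem.List.pyRange 0 n.length 1).foldl
    (fun (st : Int × Option Int × Int) i =>
      match PySem.List.pyGet? n i with
      | some v => if st.1 < v then (v, some i, st.2.2 + 1) else st
      | none => st)                 -- unreachable: i ∈ range(len(n))
    (0, none, 0)
  (s.2.2, s.2.1)

-- ===== PORT B =====
def hire_assistant_alt (n : List Int) : Int × Option Int :=
  let cnt : Int := (PySem.List.enumerate n 0).foldl
    (fun acc p =>
      if 0 < p.2 ∧ ∀ w ∈ PySem.List.slice n none (some p.1), w < p.2 then acc + 1 else acc)
    0
  let m : Int := (PySem.List.max? n (fun x => x)).getD 0   -- max(n, default=0)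
  let hire : Option Int := if 0 < m then (PySem.List.index? n m).map Int.ofNat else none
  (cnt, hire)

-- ===== PRECONDITION & SPEC =====
def Spec_hire_assistant (n : List Int) (out : Int × Option Int) : Prop := out = hire_assistant_alt n
instance (n : List Int) (out : Int × Option Int) : Decidable (Spec_hire_assistant n out) := by unfold Spec_hire_assistant; infer_instance

-- ===== CLAIM (what is proved, stated in full; the proofs are below) =====
def Claim_equal_hire_assistant : Prop := ∀ (n : List Int), Dom_hire_assistant n → Spec_hire_assistant n (hire_assistant n)

-- ===== LEMMAS AND PROOFS =====

-- A's loop, as a function of the list (same body as hire_assistant)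
def stA (n : List Int) : Int × Option Int × Int :=
  (PySem.List.pyRange 0 n.length 1).foldl
    (fun (st : Int × Option Int × Int) i =>
      match PySem.List.pyGet? n i with
      | some v => if st.1 < v then (v, some i, st.2.2 + 1) else st
      | none => st)
    (0, none, 0)

-- running max with floor 0 (A's "best")
def M (l : List Int) : Int := l.foldl max 0

lemma M_nonneg (l : List Int) : 0 ≤ M l := (PySem.List.le_foldl_max l 0).1

lemma M_isMax (l : List Int) : ∀ y ∈ l, y ≤ M l := (PySem.List.le_foldl_max l 0).2

lemma M_mem (l : List Int) : M l = 0 ∨ M l ∈ l := PySem.List.foldl_max_mem l 0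

lemma M_append (l : List Int) (x : Int) : M (l ++ [x]) = max (M l) x := by
  simp [M, List.foldl_append]

lemma foldl_max_init (t : List Int) (a b : Int) :
    t.foldl max (max a b) = max a (t.foldl max b) := by
  induction t generalizing b with
  | nil => rfl
  | cons c t ih => simp only [List.foldl_cons, max_assoc, ih]

lemma M_cons (h : Int) (t : List Int) : M (h :: t) = max 0 (t.foldl max h) := by
  simp only [M, List.foldl_cons]
  exact foldl_max_init t 0 h

-- the default-0 max of B versus M
lemma maxD_pos_iff (n : List Int) :
    (0 < ((PySem.List.max? n (fun x => x)).getD 0) ↔ 0 < M n) ∧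
    (0 < M n → ((PySem.List.max? n (fun x => x)).getD 0) = M n) := by
  cases n with
  | nil => simp [M, PySem.List.max?]
  | cons h t =>
    rw [PySem.List.max?_id_cons, M_cons]
    constructor
    · simp only [Option.getD_some]
      omega
    · intro hp
      simp only [Option.getD_some]
      omega

lemma stA_append (l : List Int) (x : Int) :
    stA (l ++ [x]) =
      (if (stA l).1 < x then (x, some (l.length : Int), (stA l).2.2 + 1) else stA l) := by
  unfold stA
  have hlen : ((l ++ [x]).length : Int) = (l.length : Int) + 1 := by
    simp
  rw [hlen, PySem.List.pyRange_one_succ_right (by positivity), List.foldl_append]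
  have hcongr :
      (PySem.List.pyRange 0 (l.length : Int) 1).foldl
        (fun (st : Int × Option Int × Int) i =>
          match PySem.List.pyGet? (l ++ [x]) i with
          | some v => if st.1 < v then (v, some i, st.2.2 + 1) else st
          | none => st) (0, none, 0)
      = (PySem.List.pyRange 0 (l.length : Int) 1).foldl
        (fun (st : Int × Option Int × Int) i =>
          match PySem.List.pyGet? l i with
          | some v => if st.1 < v then (v, some i, st.2.2 + 1) else st
          | none => st) (0, none, 0) := by
    apply PySem.List.foldl_congr_mem
    intro acc i hi
    rw [PySem.List.mem_pyRange_one] at hi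
    have : PySem.List.pyGet? (l ++ [x]) i = PySem.List.pyGet? l i := by
      rw [PySem.List.pyGet?_of_nonneg (l ++ [x]) hi.1, PySem.List.pyGet?_of_nonneg l hi.1]
      rw [List.getElem?_append_left (by omega)]
    rw [this]
  rw [hcongr]
  simp only [List.foldl_cons, List.foldl_nil]
  rw [PySem.List.pyGet?_append_length]

-- components of B as functions
def cntB (n : List Int) : Int :=
  (PySem.List.enumerate n 0).foldl
    (fun acc p =>
      if 0 < p.2 ∧ ∀ w ∈ PySem.List.slice n none (some p.1), w < p.2 then acc + 1 else acc)
    0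

def hireB (n : List Int) : Option Int :=
  if 0 < ((PySem.List.max? n (fun x => x)).getD 0)
  then (PySem.List.index? n ((PySem.List.max? n (fun x => x)).getD 0)).map Int.ofNat
  else none

lemma alt_eq (n : List Int) : hire_assistant_alt n = (cntB n, hireB n) := rfl

lemma cntB_append (l : List Int) (x : Int) :
    cntB (l ++ [x]) = cntB l + (if M l < x then 1 else 0) := by
  unfold cntB
  rw [PySem.List.enumerate_append, List.foldl_append]
  have hcongr :
      (PySem.List.enumerate l 0).foldl
        (fun acc p =>
          if 0 < p.2 ∧ ∀ w ∈ PySem.List.slice (l ++ [x]) none (some p.1), w < p.2 then acc + 1 else acc) (0:Int)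
      = (PySem.List.enumerate l 0).foldl
        (fun acc p =>
          if 0 < p.2 ∧ ∀ w ∈ PySem.List.slice l none (some p.1), w < p.2 then acc + 1 else acc) (0:Int) := by
    apply PySem.List.foldl_congr_mem
    intro acc p hp
    rw [PySem.List.mem_enumerate_iff] at hp
    obtain ⟨k, hk, rfl⟩ := hp
    have hs : PySem.List.slice (l ++ [x]) none (some ((0:Int) + k)) =
        PySem.List.slice l none (some ((0:Int) + k)) := by
      simp only [zero_add]
      rw [PySem.List.slice_to_natCast, PySem.List.slice_to_natCast,
        List.take_append_of_le_length (by omega)]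
    rw [hs]
  simp only [PySem.List.enumerate_cons, PySem.List.enumerate_nil, List.foldl_cons,
    List.foldl_nil, zero_add]
  have hs : PySem.List.slice (l ++ [x]) none (some ((l.length : Int))) = l := by
    rw [PySem.List.slice_to_natCast]
    simp
  rw [hs]
  have hiff : (0 < x ∧ ∀ w ∈ l, w < x) ↔ M l < x := by
    constructor
    · rintro ⟨hx, hall⟩
      rcases M_mem l with h0 | hm
      · omega
      · exact hall _ hm
    · intro h
      exact ⟨lt_of_le_of_lt (M_nonneg l) h, fun w hw => lt_of_le_of_lt (M_isMax l w hw) h⟩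
  by_cases h : M l < x
  · rw [if_pos h, if_pos (hiff.mpr h)]
    omega
  · rw [if_neg h, if_neg (fun hc => h (hiff.mp hc))]
    omega

lemma hireB_append (l : List Int) (x : Int) :
    hireB (l ++ [x]) = (if M l < x then some (l.length : Int) else hireB l) := by
  unfold hireB
  have hM := M_append l x
  by_cases h : M l < x
  · -- x is a new strict record: x > 0, x ∉ l, global max = x
    have hx : (0:Int) < x := lt_of_le_of_lt (M_nonneg l) h
    have hnotmem : x ∉ l := fun hm => absurd (M_isMax l x hm) (by omega)
    have hMx : M (l ++ [x]) = x := by rw [hM]; omega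
    have hmax : ((PySem.List.max? (l ++ [x]) (fun x => x)).getD 0) = x := by
      have := (maxD_pos_iff (l ++ [x])).2 (by omega)
      omega
    rw [hmax, if_pos hx, if_pos h,
      PySem.List.index?_append_singleton_self l x hnotmem]
    simp
  · -- max unchanged
    have hMx : M (l ++ [x]) = M l := by rw [hM]; omega
    by_cases hp : 0 < M l
    · have hmem : M l ∈ l := by rcases M_mem l with h0 | hm; exacts [absurd h0 (by omega), hm]
      have h1 := (maxD_pos_iff (l ++ [x])).2 (by omega)
      have h2 := (maxD_pos_iff l).2 hp
      rw [h1, h2, hMx, if_pos hp, if_neg h,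
        PySem.List.index?_append_of_mem _ hmem, if_pos hp]
    · have h1 : ¬ 0 < ((PySem.List.max? (l ++ [x]) (fun x => x)).getD 0) := by
        rw [(maxD_pos_iff (l ++ [x])).1]; omega
      have h2 : ¬ 0 < ((PySem.List.max? l (fun x => x)).getD 0) := by
        rw [(maxD_pos_iff l).1]; omega
      rw [if_neg h1, if_neg h, if_neg h2]

lemma stA_nil : stA [] = (0, none, 0) := rfl

lemma stA_eq (n : List Int) : stA n = (M n, hireB n, cntB n) := by
  induction n using List.reverseRecOn with
  | nil =>
    have : hireB [] = none := by simp [hireB, PySem.List.max?]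
    rw [stA_nil, this]; rfl
  | append_singleton l x ih =>
    rw [stA_append, ih, cntB_append, hireB_append, M_append]
    by_cases h : M l < x
    · simp only [if_pos h]
      congr 1
      · omega
    · simp only [if_neg h]
      congr 1
      · omega
      · congr 1
        omega

lemma port_eq_stA (n : List Int) : hire_assistant n = ((stA n).2.2, (stA n).2.1) := rfl

-- ===== VERDICT (by name: the statement is the Claim_ definition above) =====
theorem hire_assistant_spec : Claim_equal_hire_assistant := by
  intro n _
  show hire_assistant n = hire_assistant_alt n
  rw [port_eq_stA, stA_eq, alt_eq]
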